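-- pv_equiv track=rewrite | github.com/fmatter/lingcorp | src/lingcorp/search.py | get_information_status
-- ===== SOURCE A (Python) =====
-- def get_information_status(rec_list):
--     # topic persistence: how many reps in next 10 clauses?
--     # referential distance: how many clauses since last mention?
--     # come up with better informatoin status
--     res = []
--     found = []
--     for rec in rec_list:
--         if "refind" in rec and rec["refind"]:
--             if rec["refind"] not in found:
--                 found.append(rec["refind"])
--                 rec["info"] = "new"
--             else:
--                 rec["info"] = "old"
--         res.append(rec)
--     return res
-- ===== SOURCE B (Python) =====
-- def get_information_status(rec_list):
--     # Two-pass: first record the index of each refind value's first occurrence,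
--     # then tag each refind record by comparing its index with that first index.
--     first = {}
--     for i, rec in enumerate(rec_list):
--         v = rec.get("refind")
--         if v and v not in first:
--             first[v] = i
--     res = []
--     for i, rec in enumerate(rec_list):
--         v = rec.get("refind")
--         if v:
--             rec["info"] = "new" if first[v] == i else "old"
--         res.append(rec)
--     return res
-- ===== Notes on version B (the rewrite author's own statement) =====
-- stated objective: alternative
-- what changed: Replaces A's single pass carrying a growing 'found' list (membership scan per record) by a two-pass index scheme: pass one builds a dict from each truthy refind value to its first-occurrence index, pass two tags each record 'new'/'old' by comparing its index with that stored first index.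
import Mathlib
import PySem

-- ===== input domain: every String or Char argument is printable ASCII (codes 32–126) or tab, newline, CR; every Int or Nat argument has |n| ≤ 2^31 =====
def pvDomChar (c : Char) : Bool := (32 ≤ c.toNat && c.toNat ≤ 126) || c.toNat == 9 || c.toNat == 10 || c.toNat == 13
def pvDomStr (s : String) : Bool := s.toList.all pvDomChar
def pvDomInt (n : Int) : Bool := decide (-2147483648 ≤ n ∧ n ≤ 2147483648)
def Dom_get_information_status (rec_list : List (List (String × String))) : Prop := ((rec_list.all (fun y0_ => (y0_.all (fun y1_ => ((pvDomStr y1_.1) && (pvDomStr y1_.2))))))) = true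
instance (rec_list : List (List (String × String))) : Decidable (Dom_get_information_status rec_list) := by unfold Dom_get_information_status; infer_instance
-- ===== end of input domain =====

-- B replaces A's one-pass found-list scan by a two-pass scheme (first-occurrence index dict,
-- then tag by index comparison); equal return values (both mutate the records in Python; the
-- equivalence proved here is about the returned list of records).


-- ===== PORT A =====
-- one pass; state = (res, found); membership test on the found list
def gisStepA (st : List (List (String × String)) × List String)
    (rec : List (String × String)) : List (List (String × String)) × List String :=
  match PySem.Dict.get? (PySem.Dict.mk rec) "refind" with
  | some v =>
      if v ≠ "" then
        if v ∉ st.2 then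
          (st.1 ++ [((PySem.Dict.mk rec).insert "info" "new").items], st.2 ++ [v])
        else
          (st.1 ++ [((PySem.Dict.mk rec).insert "info" "old").items], st.2)
      else (st.1 ++ [rec], st.2)
  | none => (st.1 ++ [rec], st.2)

def get_information_status (rec_list : List (List (String × String))) :
    List (List (String × String)) :=
  (rec_list.foldl gisStepA ([], [])).1

-- ===== PORT B =====
-- pass one: dict from each truthy refind value to the index of its first occurrence
def gisFirstStep (d : PySem.Dict String Int) (p : Int × List (String × String)) :
    PySem.Dict String Int :=
  match PySem.Dict.get? (PySem.Dict.mk p.2) "refind" with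
  | some v => if v ≠ "" ∧ ¬ d.contains v then d.insert v p.1 else d
  | none => d

def gisFirst (rec_list : List (List (String × String))) : PySem.Dict String Int :=
  (PySem.List.enumerate rec_list).foldl gisFirstStep PySem.Dict.empty

-- pass two: tag by comparing the current index with the stored first-occurrence index
def gisOutStep (first : PySem.Dict String Int) (res : List (List (String × String)))
    (p : Int × List (String × String)) : List (List (String × String)) :=
  match PySem.Dict.get? (PySem.Dict.mk p.2) "refind" with
  | some v =>
      if v ≠ "" then
        res ++ [((PySem.Dict.mk p.2).insert "info"
          (if first.get? v = some p.1 then "new" else "old")).items]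
      else res ++ [p.2]
  | none => res ++ [p.2]

def get_information_status_alt (rec_list : List (List (String × String))) :
    List (List (String × String)) :=
  let first := gisFirst rec_list
  (PySem.List.enumerate rec_list).foldl (gisOutStep first) []

-- ===== PRECONDITION & SPEC =====
def Spec_get_information_status (rec_list : List (List (String × String))) (out : List (List (String × String))) : Prop := out = get_information_status_alt rec_list
instance (rec_list : List (List (String × String))) (out : List (List (String × String))) : Decidable (Spec_get_information_status rec_list out) := by unfold Spec_get_information_status; infer_instance

-- ===== CLAIM (what is proved, stated in full; the proofs are below) =====
def Claim_equal_get_information_status : Prop := ∀ (rec_list : List (List (String × String))), Dom_get_information_status rec_list → Spec_get_information_status rec_list (get_information_status rec_list)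

-- ===== LEMMAS AND PROOFS =====

-- the truthy "refind" value of a record, if any
def refOf (rec : List (String × String)) : Option String :=
  match PySem.Dict.get? (PySem.Dict.mk rec) "refind" with
  | some v => if v ≠ "" then some v else none
  | none => none

def refFind (v : String) (p : Int × List (String × String)) : Option Int :=
  if refOf p.2 = some v then some p.1 else none

def tagged (rec : List (String × String)) (s : String) : List (String × String) :=
  ((PySem.Dict.mk rec).insert "info" s).items

theorem stepA_none {rec : List (String × String)} (st) (h : refOf rec = none) :
    gisStepA st rec = (st.1 ++ [rec], st.2) := by
  unfold refOf at h; unfold gisStepA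
  cases hg : PySem.Dict.get? (PySem.Dict.mk rec) "refind" with
  | none => rfl
  | some v => rw [hg] at h; by_cases hv : v ≠ "" <;> simp [hv] at h ⊢

theorem stepA_some {rec : List (String × String)} {v : String} (st) (h : refOf rec = some v) :
    gisStepA st rec =
      if v ∈ st.2 then (st.1 ++ [tagged rec "old"], st.2)
      else (st.1 ++ [tagged rec "new"], st.2 ++ [v]) := by
  unfold refOf at h; unfold gisStepA tagged
  cases hg : PySem.Dict.get? (PySem.Dict.mk rec) "refind" with
  | none => rw [hg] at h; exact absurd h (by simp)
  | some w =>
      rw [hg] at h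
      by_cases hw : w ≠ ""
      · simp [hw] at h; subst h
        by_cases hm : w ∈ st.2 <;> simp [hw, hm]
      · simp [hw] at h

theorem stepF_none {rec : List (String × String)} (d : PySem.Dict String Int) (k : Int)
    (h : refOf rec = none) : gisFirstStep d (k, rec) = d := by
  unfold refOf at h; unfold gisFirstStep
  cases hg : PySem.Dict.get? (PySem.Dict.mk rec) "refind" with
  | none => rfl
  | some v =>
      rw [hg] at h
      by_cases hv : v ≠ ""
      · simp [hv] at h
      · simp [hv]

theorem stepF_some {rec : List (String × String)} {v : String} (d : PySem.Dict String Int)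
    (k : Int) (h : refOf rec = some v) :
    gisFirstStep d (k, rec) = if ¬ d.contains v then d.insert v k else d := by
  unfold refOf at h; unfold gisFirstStep
  cases hg : PySem.Dict.get? (PySem.Dict.mk rec) "refind" with
  | none => rw [hg] at h; exact absurd h (by simp)
  | some w =>
      rw [hg] at h
      by_cases hw : w ≠ ""
      · simp [hw] at h; subst h
        by_cases hc : (d.contains w : Prop) <;> simp [hw, hc]
      · simp [hw] at h

theorem stepOut_none {rec : List (String × String)} (F : PySem.Dict String Int)
    (res) (k : Int) (h : refOf rec = none) : gisOutStep F res (k, rec) = res ++ [rec] := by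
  unfold refOf at h; unfold gisOutStep
  cases hg : PySem.Dict.get? (PySem.Dict.mk rec) "refind" with
  | none => rfl
  | some v => rw [hg] at h; by_cases hv : v ≠ "" <;> simp [hv] at h ⊢

theorem stepOut_some {rec : List (String × String)} {v : String} (F : PySem.Dict String Int)
    (res) (k : Int) (h : refOf rec = some v) :
    gisOutStep F res (k, rec) =
      res ++ [tagged rec (if F.get? v = some k then "new" else "old")] := by
  unfold refOf at h; unfold gisOutStep tagged
  cases hg : PySem.Dict.get? (PySem.Dict.mk rec) "refind" with
  | none => rw [hg] at h; exact absurd h (by simp)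
  | some w =>
      rw [hg] at h
      by_cases hw : w ≠ ""
      · simp [hw] at h; subst h; simp [hw]
      · simp [hw] at h

-- pass one computes the first occurrence: lookup in the built dict = first match in the pairs
theorem gisFirst_get? (ps : List (Int × List (String × String))) (d : PySem.Dict String Int)
    (v : String) :
    (ps.foldl gisFirstStep d).get? v = (d.get? v).or (ps.findSome? (refFind v)) := by
  induction ps generalizing d with
  | nil => simp
  | cons p ps ih =>
      obtain ⟨k, rec⟩ := p
      simp only [List.foldl_cons, List.findSome?_cons]
      cases h : refOf rec with
      | none =>
          rw [stepF_none d k h, ih]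
          have : refFind v (k, rec) = none := by simp [refFind, h]
          rw [this]
      | some w =>
          rw [stepF_some d k h]
          by_cases hv : w = v
          · subst hv
            have hrf : refFind w (k, rec) = some k := by simp [refFind, h]
            rw [hrf]
            by_cases hc : (d.contains w : Prop)
            · rw [if_neg (by simpa using hc), ih]
              have hs : (d.get? w).isSome := by
                rw [← PySem.Dict.contains_eq_isSome_get?]; exact hc
              obtain ⟨j, hj⟩ := Option.isSome_iff_exists.mp hs
              simp [hj]
            · have hn : d.get? w = none := by
                rcases hx : d.get? w with _ | j
                · rfl
                · exact absurd (by rw [PySem.Dict.contains_eq_isSome_get?, hx]; rfl) hc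
              rw [if_pos (by simpa using hc), ih, PySem.Dict.get?_insert_self, hn]
              simp
          · have hrf : refFind v (k, rec) = none := by simp [refFind, h, hv]
            rw [hrf]
            split_ifs with hc
            · rw [ih]
            · rw [ih, PySem.Dict.get?_insert_of_ne d k (fun e => hv e.symm)]

theorem findSome_enum_none_iff (pre : List (List (String × String))) (s : Int) (v : String) :
    (PySem.List.enumerate pre s).findSome? (refFind v) = none ↔
      ∀ r ∈ pre, refOf r ≠ some v := by
  induction pre generalizing s with
  | nil => simp [PySem.List.enumerate_nil]
  | cons r l ih =>
      rw [PySem.List.enumerate_cons, List.findSome?_cons]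
      by_cases h : refOf r = some v
      · simp [refFind, h]
      · simp [refFind, h, ih]

theorem findSome_enum_bound (pre : List (List (String × String))) (s : Int) (v : String)
    (j : Int) (h : (PySem.List.enumerate pre s).findSome? (refFind v) = some j) :
    s ≤ j ∧ j < s + pre.length := by
  induction pre generalizing s with
  | nil => simp [PySem.List.enumerate_nil] at h
  | cons r l ih =>
      rw [PySem.List.enumerate_cons, List.findSome?_cons] at h
      by_cases hr : refOf r = some v
      · simp only [refFind, hr] at h
        injection h with h; subst h
        refine ⟨le_refl s, ?_⟩
        simp only [List.length_cons]; push_cast; omega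
      · simp only [refFind, hr] at h
        obtain ⟨h1, h2⟩ := ih (s + 1) h
        constructor
        · omega
        · simp only [List.length_cons]; push_cast; omega

theorem enumerate_append (a b : List (List (String × String))) (s : Int) :
    PySem.List.enumerate (a ++ b) s =
      PySem.List.enumerate a s ++ PySem.List.enumerate b (s + a.length) := by
  induction a generalizing s with
  | nil => simp [PySem.List.enumerate_nil]
  | cons x xs ih =>
      have hs : s + (((x :: xs).length : Nat) : Int) = s + 1 + (xs.length : Int) := by
        simp only [List.length_cons]; push_cast; ring
      rw [List.cons_append, PySem.List.enumerate_cons, ih, hs, PySem.List.enumerate_cons,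
        List.cons_append]

-- main induction: A's single stateful pass equals B's second pass, given the invariant
-- that `found` holds exactly the truthy refind values of the already-processed prefix
theorem main_invariant (l pre res : List (List (String × String))) (found : List String)
    (F : PySem.Dict String Int)
    (HF : ∀ v, F.get? v = ((PySem.List.enumerate (pre ++ l) 0).findSome? (refFind v)))
    (HI : ∀ v, v ∈ found ↔ ∃ r ∈ pre, refOf r = some v) :
    (l.foldl gisStepA (res, found)).1 =
      (PySem.List.enumerate l (pre.length : Int)).foldl (gisOutStep F) res := by
  induction l generalizing pre res found with
  | nil => simp [PySem.List.enumerate_nil]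
  | cons r l' ih =>
      rw [PySem.List.enumerate_cons, List.foldl_cons, List.foldl_cons]
      have hlen : ((pre ++ [r]).length : Int) = (pre.length : Int) + 1 := by
        simp
      cases h : refOf r with
      | none =>
          rw [stepA_none _ h, stepOut_none F res _ h]
          have := ih (pre ++ [r]) (res ++ [r]) found
            (by intro v; rw [HF]; congr 1; rw [List.append_assoc]; rfl)
            (by intro v; rw [HI]; constructor
                · rintro ⟨r', hr', he⟩; exact ⟨r', by simp [hr'], he⟩
                · rintro ⟨r', hr', he⟩
                  rcases List.mem_append.mp hr' with hm | hm
                  · exact ⟨r', hm, he⟩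
                  · simp at hm; subst hm; rw [he] at h; cases h)
          rw [hlen] at this; exact this
      | some v =>
          have hFv : F.get? v =
              ((PySem.List.enumerate pre 0).findSome? (refFind v)).or
                (some (pre.length : Int)) := by
            rw [HF, enumerate_append, List.findSome?_append]
            congr 1
            rw [PySem.List.enumerate_cons, List.findSome?_cons]
            simp [refFind, h]
          rw [stepA_some _ h, stepOut_some F res _ h]
          by_cases hm : v ∈ found
          · -- already seen: some earlier index j < pre.length, so F lookup ≠ current index
            obtain ⟨r', hr', he⟩ := (HI v).mp hm
            have hpf : (PySem.List.enumerate pre 0).findSome? (refFind v) ≠ none := by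
              intro hn
              exact ((findSome_enum_none_iff pre 0 v).mp hn) r' hr' he
            obtain ⟨j, hj⟩ := Option.ne_none_iff_exists'.mp hpf
            have hb := findSome_enum_bound pre 0 v j hj
            have hne : F.get? v ≠ some (pre.length : Int) := by
              rw [hFv, hj]; simp; omega
            rw [if_pos hm, if_neg hne]
            have := ih (pre ++ [r]) (res ++ [tagged r "old"]) found
              (by intro w; rw [HF]; congr 1; rw [List.append_assoc]; rfl)
              (by intro w; rw [HI]; constructor
                  · rintro ⟨r'', hr'', he'⟩; exact ⟨r'', by simp [hr''], he'⟩
                  · rintro ⟨r'', hr'', he'⟩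
                    rcases List.mem_append.mp hr'' with hx | hx
                    · exact ⟨r'', hx, he'⟩
                    · simp at hx; subst hx
                      rw [he'] at h; injection h with h; subst h
                      exact (HI _).mp hm)
            rw [hlen] at this; exact this
          · -- first occurrence: prefix has none, so F lookup = current index
            have hpf : (PySem.List.enumerate pre 0).findSome? (refFind v) = none := by
              rw [findSome_enum_none_iff]
              intro r' hr' he
              exact hm ((HI v).mpr ⟨r', hr', he⟩)
            have heq : F.get? v = some (pre.length : Int) := by
              rw [hFv, hpf]; rfl
            rw [if_neg hm, if_pos heq]
            have := ih (pre ++ [r]) (res ++ [tagged r "new"]) (found ++ [v])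
              (by intro w; rw [HF]; congr 1; rw [List.append_assoc]; rfl)
              (by intro w
                  simp only [List.mem_append, List.mem_singleton, HI]
                  constructor
                  · rintro (⟨r'', hr'', he'⟩ | hw)
                    · exact ⟨r'', by simp [hr''], he'⟩
                    · subst hw; exact ⟨r, by simp, h⟩
                  · rintro ⟨r'', hr'', he'⟩
                    rcases hr'' with hx | hx
                    · exact Or.inl ⟨r'', hx, he'⟩
                    · subst hx
                      rw [he'] at h; injection h with h; exact Or.inr h)
            rw [hlen] at this; exact this

-- ===== VERDICT (by name: the statement is the Claim_ definition above) =====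
theorem get_information_status_spec : Claim_equal_get_information_status := by
  intro rec_list _
  unfold Spec_get_information_status get_information_status get_information_status_alt
  have := main_invariant rec_list [] [] [] (gisFirst rec_list)
    (by intro v
        unfold gisFirst
        rw [gisFirst_get? (PySem.List.enumerate rec_list) PySem.Dict.empty v]
        simp)
    (by simp)
  simpa using this
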